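-- pv_equiv track=rewrite | github.com/ultor1996/gravagents | feed.py | _extract_module_from_url
-- ===== SOURCE A (Python) =====
-- def _extract_module_from_url(url):
--     """Extract module path from documentation URL"""
--     if 'pycbc.vetoes' in url:
--         return 'pycbc.vetoes'
--     elif 'pycbc.filter' in url:
--         return 'pycbc.filter'
--     elif 'pycbc.waveform' in url:
--         return 'pycbc.waveform'
--     elif 'gwpy.timeseries' in url:
--         return 'gwpy.timeseries'
--     else:
--         # Extract from URL pattern
--         parts = url.split('/')
--         for part in parts:
--             if 'pycbc.' in part or 'gwpy.' in part:
--                 return part.replace('.html', '')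
--         return 'unknown'
-- ===== SOURCE B (Python) =====
-- KNOWN = ['pycbc.vetoes', 'pycbc.filter', 'pycbc.waveform', 'gwpy.timeseries']
--
-- def _extract_module_from_url(url):
--     """Extract module path from documentation URL"""
--     # Single pass over the '/'-segments: none of the KNOWN names contains '/',
--     # so 'k in url' holds iff k occurs inside one segment; we keep the smallest
--     # (highest-priority) index seen, plus the first fallback segment.
--     best = len(KNOWN)
--     fallback = None
--     for part in url.split('/'):
--         for i, k in enumerate(KNOWN):
--             if i < best and k in part:
--                 best = i
--         if fallback is None and ('pycbc.' in part or 'gwpy.' in part):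
--             fallback = part
--     if best < len(KNOWN):
--         return KNOWN[best]
--     if fallback is not None:
--         return fallback.replace('.html', '')
--     return 'unknown'
-- ===== Notes on version B (the rewrite author's own statement) =====
-- stated objective: alternative
-- what changed: B never tests the whole url: it makes a single pass over the slash-separated segments keeping a min-priority accumulator over the KNOWN module table plus the first fallback segment, which is correct because no KNOWN name contains a slash; A instead runs four whole-string substring scans and then a second loop over the segments.
import Mathlib
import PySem

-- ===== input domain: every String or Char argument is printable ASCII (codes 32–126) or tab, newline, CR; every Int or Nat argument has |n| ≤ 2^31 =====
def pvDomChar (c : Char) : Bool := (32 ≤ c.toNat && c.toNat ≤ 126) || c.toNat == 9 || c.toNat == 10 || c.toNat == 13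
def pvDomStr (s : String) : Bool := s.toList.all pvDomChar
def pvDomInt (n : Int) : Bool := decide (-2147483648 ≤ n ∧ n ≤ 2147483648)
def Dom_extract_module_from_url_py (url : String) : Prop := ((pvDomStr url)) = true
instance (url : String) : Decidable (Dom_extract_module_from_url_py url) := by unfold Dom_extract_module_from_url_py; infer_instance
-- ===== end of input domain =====

-- B replaces A's four whole-url substring scans plus a second segment loop by a SINGLE pass
-- over the slash-separated segments with a min-priority accumulator over a KNOWN table
-- (correct because no KNOWN name contains a slash); objective: alternative.

-- ===== PORT A =====
-- fallback loop of A: first part containing 'pycbc.' or 'gwpy.' with '.html' stripped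
def pvFallbackA : List String → String
  | [] => "unknown"
  | p :: rest =>
    if PySem.Str.isIn "pycbc." p || PySem.Str.isIn "gwpy." p then
      PySem.Str.replace p ".html" ""
    else pvFallbackA rest

def extract_module_from_url_py (url : String) : String :=
  if PySem.Str.isIn "pycbc.vetoes" url then "pycbc.vetoes"
  else if PySem.Str.isIn "pycbc.filter" url then "pycbc.filter"
  else if PySem.Str.isIn "pycbc.waveform" url then "pycbc.waveform"
  else if PySem.Str.isIn "gwpy.timeseries" url then "gwpy.timeseries"
  else pvFallbackA (((PySem.Str.split? url "/").getD []))

-- ===== PORT B =====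
def pvKNOWN : List String := ["pycbc.vetoes", "pycbc.filter", "pycbc.waveform", "gwpy.timeseries"]

-- one step of B's single pass: update the best (smallest) KNOWN index seen and the fallback
def pvStep (st : Int × Option String) (part : String) : Int × Option String :=
  let best := (PySem.List.enumerate pvKNOWN).foldl
    (fun b ik => if ik.1 < b ∧ PySem.Str.isIn ik.2 part then ik.1 else b) st.1
  let fb := match st.2 with
    | some f => some f
    | none =>
      if PySem.Str.isIn "pycbc." part || PySem.Str.isIn "gwpy." part then some part else none
  (best, fb)

def extract_module_from_url_py_alt (url : String) : String :=
  let parts := (PySem.Str.split? url "/").getD []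
  let st := parts.foldl pvStep ((pvKNOWN.length : Int), none)
  if st.1 < (pvKNOWN.length : Int) then (PySem.List.pyGet? pvKNOWN st.1).getD ""
  else
    match st.2 with
    | some f => PySem.Str.replace f ".html" ""
    | none => "unknown"

-- ===== PRECONDITION & SPEC =====
def Spec_extract_module_from_url_py (url : String) (out : String) : Prop := out = extract_module_from_url_py_alt url
instance (url : String) (out : String) : Decidable (Spec_extract_module_from_url_py url out) := by unfold Spec_extract_module_from_url_py; infer_instance

-- ===== CLAIM (what is proved, stated in full; the proofs are below) =====
def Claim_equal_extract_module_from_url_py : Prop := ∀ (url : String), Dom_extract_module_from_url_py url → Spec_extract_module_from_url_py url (extract_module_from_url_py url)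

-- ===== LEMMAS AND PROOFS =====

-- ---- PySem.Chars.splitOn with a single-char separator is List.splitOn ----
theorem pv_go_eq (c : Char) (fuel : Nat) : ∀ (l cur : List Char) (acc : List (List Char)) (_ : l.length ≤ fuel),
    PySem.Chars.splitOn.go [c] fuel l cur acc
      = acc.reverse ++ (l.splitOn c).modifyHead (cur.reverse ++ ·) := by
  induction fuel with
  | zero =>
    intro l cur acc h
    have : l = [] := List.eq_nil_of_length_eq_zero (Nat.le_zero.mp h)
    subst this
    simp [PySem.Chars.splitOn.go, List.splitOn]
  | succ f ih =>
    intro l cur acc h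
    cases l with
    | nil => simp [PySem.Chars.splitOn.go, List.splitOn]
    | cons a rest =>
      simp only [PySem.Chars.splitOn.go]
      by_cases hc : c = a
      · subst hc
        simp only [List.isPrefixOf, BEq.rfl, Bool.true_and, if_pos, List.length_cons,
          List.length_nil, List.drop_succ_cons, List.drop_zero]
        rw [ih rest [] (cur.reverse :: acc) (by simpa using Nat.le_of_succ_le_succ h)]
        have hid : ∀ (L : List (List Char)), L.modifyHead (fun x => x) = L := by
          intro L; cases L <;> rfl
        simp [List.splitOn, List.splitOnP_cons, hid]
      · have hpf : ([c].isPrefixOf (a :: rest)) = false := by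
          simp [List.isPrefixOf]; exact fun h' => hc h'
        simp only [hpf, Bool.false_eq_true, if_neg, not_false_iff]
        rw [ih rest (a :: cur) acc (by simpa using Nat.le_of_succ_le_succ h)]
        have hb : (a == c) = false := by simp; exact fun h' => hc h'.symm
        simp [List.splitOn, List.splitOnP_cons, hb, List.modifyHead_modifyHead,
          List.reverse_cons, List.append_assoc, Function.comp_def]

theorem pv_splitOn_eq (c : Char) (s : List Char) :
    PySem.Chars.splitOn s [c] = s.splitOn c := by
  have hid : ∀ (L : List (List Char)), L.modifyHead (fun x => x) = L := by
    intro L; cases L <;> rfl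
  have := pv_go_eq c (s.length + 1) s [] [] (by omega)
  simpa [PySem.Chars.splitOn, hid] using this

-- ---- slash-free substrings live inside single segments ----
theorem pv_splitOn_head_prefix (c : Char) :
    ∀ (s : List Char), ∃ h tl, s.splitOn c = h :: tl ∧ h <+: s := by
  intro s
  induction s with
  | nil => exact ⟨[], [], by simp [List.splitOn, List.splitOnP_nil], List.nil_prefix⟩
  | cons a t ih =>
    by_cases hac : a = c
    · subst hac
      exact ⟨[], t.splitOn a, by simp [List.splitOn, List.splitOnP_cons], List.nil_prefix⟩
    · have hb : (a == c) = false := by simp; exact hac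
      rcases ih with ⟨h, tl, he, hp⟩
      refine ⟨a :: h, tl, ?_, List.cons_prefix_cons.mpr ⟨rfl, hp⟩⟩
      simp only [List.splitOn] at he ⊢
      simp [List.splitOnP_cons, hb, he]

theorem pv_splitOn_head_pre (c : Char) (sub : List Char) (hc : c ∉ sub) :
    ∀ (s : List Char), sub <+: s → ∃ h tl, s.splitOn c = h :: tl ∧ sub <+: h := by
  induction sub with
  | nil =>
    intro s _
    rcases List.exists_cons_of_ne_nil (List.splitOnP_ne_nil _ s) with ⟨h, tl, he⟩
    exact ⟨h, tl, he, List.nil_prefix⟩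
  | cons a sub' ih =>
    intro s hp
    rcases hp with ⟨r, hr⟩
    subst hr
    have hac : (a == c) = false := by
      simp; rintro rfl; exact hc (List.mem_cons_self)
    have hc' : c ∉ sub' := fun h => hc (List.mem_cons_of_mem _ h)
    rcases ih hc' (sub' ++ r) ⟨r, rfl⟩ with ⟨h, tl, he, hpre⟩
    refine ⟨a :: h, tl, ?_, List.cons_prefix_cons.mpr ⟨rfl, hpre⟩⟩
    simp only [List.splitOn] at he ⊢
    simp [List.splitOnP_cons, hac, he]

theorem pv_infix_of_mem_splitOn (c : Char) (s : List Char) :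
    ∀ p, p ∈ s.splitOn c → p <:+: s := by
  induction s with
  | nil =>
    intro p h
    simp [List.splitOn, List.splitOnP_nil] at h; subst h; exact List.nil_infix
  | cons a t ih =>
    intro p h
    by_cases hac : a = c
    · subst hac
      simp [List.splitOn, List.splitOnP_cons] at h
      rcases h with rfl | h
      · exact List.nil_infix
      · exact List.infix_cons (ih p h)
    · have hb : (a == c) = false := by simp; exact hac
      rcases pv_splitOn_head_prefix c t with ⟨h0, tl0, he0, hp0⟩
      simp only [List.splitOn] at h he0
      simp only [List.splitOnP_cons, hb, Bool.false_eq_true, if_neg, not_false_iff] at h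
      rw [he0, List.modifyHead_cons] at h
      rcases List.mem_cons.mp h with rfl | htl
      · exact (List.cons_prefix_cons.mpr ⟨rfl, hp0⟩).isInfix
      · exact List.infix_cons (ih p (by simp only [List.splitOn]; rw [he0]; exact List.mem_cons_of_mem _ htl))

theorem pv_mem_splitOn_of_infix (c : Char) (sub : List Char) (hne : sub ≠ []) (hc : c ∉ sub) :
    ∀ (s : List Char), sub <:+: s → ∃ p ∈ s.splitOn c, sub <:+: p := by
  intro s
  induction s with
  | nil => intro h; exact absurd (List.eq_nil_of_infix_nil h) hne
  | cons a t ih =>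
    intro h
    rcases List.infix_cons_iff.mp h with hp | hi
    · rcases pv_splitOn_head_pre c sub hc (a :: t) hp with ⟨h, tl, he, hpre⟩
      exact ⟨h, by simp [he], hpre.isInfix⟩
    · rcases ih hi with ⟨p, hmem, hinf⟩
      by_cases hac : a = c
      · subst hac
        refine ⟨p, ?_, hinf⟩
        simp [List.splitOn, List.splitOnP_cons]
        right; exact hmem
      · have hb : (a == c) = false := by simp; exact hac
        rcases List.exists_cons_of_ne_nil (List.splitOnP_ne_nil (· == c) t) with ⟨h0, tl0, he0⟩
        simp only [List.splitOn] at hmem he0 ⊢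
        rw [he0] at hmem
        rcases List.mem_cons.mp hmem with rfl | htl
        · refine ⟨a :: p, ?_, List.infix_cons hinf⟩
          simp only [List.splitOnP_cons, hb, Bool.false_eq_true, if_neg, not_false_iff]
          rw [he0, List.modifyHead_cons]
          exact List.mem_cons_self
        · exact ⟨p, by simp [List.splitOnP_cons, hb]; rw [he0]; right; exact htl, hinf⟩

theorem pv_isIn_splitOn_any (c : Char) (sub s : List Char) (hne : sub ≠ []) (hc : c ∉ sub) :
    PySem.Chars.isIn sub s = (s.splitOn c).any (fun p => PySem.Chars.isIn sub p) := by
  by_cases h : PySem.Chars.isIn sub s = true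
  · rcases pv_mem_splitOn_of_infix c sub hne hc s ((PySem.Chars.isIn_iff_infix _ _).mp h) with ⟨p, hm, hi⟩
    rw [h, eq_comm, List.any_eq_true]
    exact ⟨p, hm, (PySem.Chars.isIn_iff_infix _ _).mpr hi⟩
  · have h' := Bool.of_not_eq_true h
    rw [h', eq_comm, List.any_eq_false]
    intro p hp hcon
    exact ((PySem.Chars.isIn_eq_false_iff _ _).mp h')
      (((PySem.Chars.isIn_iff_infix _ _).mp hcon).trans (pv_infix_of_mem_splitOn c s p hp))

-- ---- the segment list of B (and of A's fallback) ----
def pvParts (url : String) : List String :=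
  (PySem.Str.split? url "/").getD []

theorem pv_parts_eq (url : String) :
    pvParts url = (url.toList.splitOn '/').map String.ofList := by
  simp [pvParts, PySem.Str.split?, PySem.Chars.split?, pv_splitOn_eq]

-- bridge: a nonempty slash-free substring is in url iff it is in some segment
theorem pv_isIn_parts (k url : String) (hne : k.toList ≠ []) (hc : '/' ∉ k.toList) :
    PySem.Str.isIn k url = (pvParts url).any (fun p => PySem.Str.isIn k p) := by
  rw [pv_parts_eq, List.any_map]
  have : ((fun p => PySem.Str.isIn k p) ∘ String.ofList)
      = fun l => PySem.Chars.isIn k.toList l := by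
    funext l
    simp [PySem.Str.isIn, String.toList_ofList]
  rw [this]
  have := pv_isIn_splitOn_any '/' k.toList url.toList hne hc
  simpa [PySem.Str.isIn] using this

-- ---- characterizing B's single pass ----
def pvIsFb (p : String) : Bool :=
  PySem.Str.isIn "pycbc." p || PySem.Str.isIn "gwpy." p

def pvIdxOf (p : String) : Int :=
  if PySem.Str.isIn "pycbc.vetoes" p then 0
  else if PySem.Str.isIn "pycbc.filter" p then 1
  else if PySem.Str.isIn "pycbc.waveform" p then 2
  else if PySem.Str.isIn "gwpy.timeseries" p then 3
  else 4

def pvLadder (parts : List String) : Int :=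
  if parts.any (fun p => PySem.Str.isIn "pycbc.vetoes" p) then 0
  else if parts.any (fun p => PySem.Str.isIn "pycbc.filter" p) then 1
  else if parts.any (fun p => PySem.Str.isIn "pycbc.waveform" p) then 2
  else if parts.any (fun p => PySem.Str.isIn "gwpy.timeseries" p) then 3
  else 4

theorem pv_inner_fold (b : Int) (p : String) (hb : b ≤ 4) :
    (PySem.List.enumerate pvKNOWN).foldl
      (fun b ik => if ik.1 < b ∧ PySem.Str.isIn ik.2 p then ik.1 else b) b
      = min b (pvIdxOf p) := by
  have he : PySem.List.enumerate pvKNOWN 0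
      = [(0, "pycbc.vetoes"), (1, "pycbc.filter"), (2, "pycbc.waveform"), (3, "gwpy.timeseries")] := by
    simp [pvKNOWN, PySem.List.enumerate_cons, PySem.List.enumerate_nil]
  rw [show PySem.List.enumerate pvKNOWN = PySem.List.enumerate pvKNOWN 0 from rfl, he]
  simp only [List.foldl_cons, List.foldl_nil, pvIdxOf]
  by_cases h0 : PySem.Str.isIn "pycbc.vetoes" p = true <;>
  by_cases h1 : PySem.Str.isIn "pycbc.filter" p = true <;>
  by_cases h2 : PySem.Str.isIn "pycbc.waveform" p = true <;>
  by_cases h3 : PySem.Str.isIn "gwpy.timeseries" p = true <;>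
  simp only [Bool.not_eq_true] at h0 h1 h2 h3 <;>
  simp only [h0, h1, h2, h3, Bool.false_eq_true, and_true, and_false, if_false, if_true] <;>
  (try split_ifs) <;> omega

theorem pv_ladder_le (parts : List String) : pvLadder parts ≤ 4 := by
  unfold pvLadder; split_ifs <;> omega

theorem pv_ladder_cons (p : String) (t : List String) :
    pvLadder (p :: t) = min (pvIdxOf p) (pvLadder t) := by
  simp only [pvLadder, pvIdxOf, List.any_cons]
  by_cases h0 : PySem.Str.isIn "pycbc.vetoes" p = true <;>
  by_cases h1 : PySem.Str.isIn "pycbc.filter" p = true <;>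
  by_cases h2 : PySem.Str.isIn "pycbc.waveform" p = true <;>
  by_cases h3 : PySem.Str.isIn "gwpy.timeseries" p = true <;>
  simp only [Bool.not_eq_true] at h0 h1 h2 h3 <;>
  simp only [h0, h1, h2, h3, Bool.true_or, Bool.false_or, Bool.false_eq_true, if_false, if_true] <;>
  (try split_ifs) <;> omega

theorem pv_idxOf_le (p : String) : pvIdxOf p ≤ 4 := by
  unfold pvIdxOf; split_ifs <;> omega

theorem pv_fold_eq (parts : List String) : ∀ (b : Int) (fb : Option String), b ≤ 4 →
    parts.foldl pvStep (b, fb)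
      = (min b (pvLadder parts), fb.or (parts.find? pvIsFb)) := by
  induction parts with
  | nil =>
    intro b fb hb
    simp only [List.foldl_nil, pvLadder, List.any_nil, Bool.false_eq_true, if_false,
      List.find?_nil, Option.or_none]
    simp only [Prod.mk.injEq]
    refine ⟨?_, by simp⟩
    simp; omega
  | cons p t ih =>
    intro b fb hb
    simp only [List.foldl_cons]
    have hstep : pvStep (b, fb) p
        = (min b (pvIdxOf p), fb.or (if pvIsFb p then some p else none)) := by
      simp only [pvStep, pv_inner_fold b p hb, pvIsFb]
      cases fb <;> simp
    rw [hstep, ih _ _ (by have := pv_idxOf_le p; simp; omega)]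
    rw [pv_ladder_cons]
    simp only [Prod.mk.injEq]
    refine ⟨?_, ?_⟩
    · simp
    · simp only [List.find?_cons]
      cases fb with
      | none =>
        cases hfb : pvIsFb p with
        | false => simp
        | true => simp
      | some f =>
        cases hfb : pvIsFb p with
        | false => simp
        | true => simp

-- A's fallback loop is the first matching segment
theorem pv_fallbackA_eq_find? (l : List String) :
    pvFallbackA l =
      (match l.find? pvIsFb with
       | some p => PySem.Str.replace p ".html" ""
       | none => "unknown") := by
  induction l with
  | nil => rfl
  | cons p rest ih =>
    have hcond : (PySem.Str.isIn "pycbc." p || PySem.Str.isIn "gwpy." p) = pvIsFb p := rfl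
    simp only [pvFallbackA, List.find?_cons, hcond]
    cases hfb : pvIsFb p
    · simp only [Bool.false_eq_true, if_false]
      exact ih
    · simp only [if_true]

-- ===== VERDICT (by name: the statement is the Claim_ definition above) =====
theorem extract_module_from_url_py_spec : Claim_equal_extract_module_from_url_py := by
  intro url _
  simp only [Spec_extract_module_from_url_py, extract_module_from_url_py,
    extract_module_from_url_py_alt]
  have hparts : ((PySem.Str.split? url "/").getD []) = pvParts url := rfl
  rw [hparts]
  rw [show ((pvParts url).foldl pvStep ((pvKNOWN.length : Int), none))
      = (min (pvKNOWN.length : Int) (pvLadder (pvParts url)), Option.or none ((pvParts url).find? pvIsFb))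
    from pv_fold_eq (pvParts url) _ _ (by decide)]
  have hlen : (pvKNOWN.length : Int) = 4 := by decide
  have hmin : min (pvKNOWN.length : Int) (pvLadder (pvParts url)) = pvLadder (pvParts url) := by
    have := pv_ladder_le (pvParts url); rw [hlen]; omega
  rw [hmin, hlen]
  have e0 := pv_isIn_parts "pycbc.vetoes" url (by decide) (by decide)
  have e1 := pv_isIn_parts "pycbc.filter" url (by decide) (by decide)
  have e2 := pv_isIn_parts "pycbc.waveform" url (by decide) (by decide)
  have e3 := pv_isIn_parts "gwpy.timeseries" url (by decide) (by decide)
  simp only [pvLadder]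
  by_cases h0 : ((pvParts url).any fun p => PySem.Str.isIn "pycbc.vetoes" p) = true <;>
  by_cases h1 : ((pvParts url).any fun p => PySem.Str.isIn "pycbc.filter" p) = true <;>
  by_cases h2 : ((pvParts url).any fun p => PySem.Str.isIn "pycbc.waveform" p) = true <;>
  by_cases h3 : ((pvParts url).any fun p => PySem.Str.isIn "gwpy.timeseries" p) = true <;>
  simp only [h0, h1, h2, h3, e0, e1, e2, e3, if_true, if_false, Bool.false_eq_true] <;>
  simp [pv_fallbackA_eq_find?, PySem.List.pyGet?, pvKNOWN] <;> decide
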